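-- pv_equiv track=rewrite | github.com/nekapoor7/Python-and-Django | PythonNEW/Practice/StringCountSubstring.py | substringFirstLast
-- ===== SOURCE A (Python) =====
-- def substringFirstLast(s):
--     result = 0
--     n = len(s)
--     for i in range(n):
--         for j in range(i,n):
--             if s[i] == s[j]:
--                 result = result + 1
--     return result
-- ===== SOURCE B (Python) =====
-- def substringFirstLast(s):
--     # One pass: position j contributes (occurrences of s[j] in s[0..j]), i.e. pairs i<=j with s[i]==s[j].
--     seen = {}
--     result = 0
--     for c in s:
--         k = seen.get(c, 0) + 1
--         seen[c] = k
--         result += k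
--     return result
-- ===== Notes on version B (the rewrite author's own statement) =====
-- stated objective: faster
-- what changed: Replaced the nested index loops comparing every pair s[i]==s[j] by a single pass that keeps a dict of character counts seen so far and adds count+1 per character.
import Mathlib
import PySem

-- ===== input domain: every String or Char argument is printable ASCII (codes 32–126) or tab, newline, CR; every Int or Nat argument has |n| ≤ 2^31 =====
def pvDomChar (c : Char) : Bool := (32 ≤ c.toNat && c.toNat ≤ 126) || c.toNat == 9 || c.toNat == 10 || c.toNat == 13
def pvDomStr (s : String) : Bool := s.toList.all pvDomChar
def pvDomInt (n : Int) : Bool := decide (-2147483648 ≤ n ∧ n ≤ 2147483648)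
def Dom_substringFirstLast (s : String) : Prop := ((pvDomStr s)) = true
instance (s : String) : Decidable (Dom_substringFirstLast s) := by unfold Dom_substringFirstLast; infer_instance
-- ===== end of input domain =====

-- B replaces A's O(n^2) nested index loops by one pass with a dict of counts seen so far (faster).

-- ===== PORT A =====
def substringFirstLast (s : String) : Int :=
  let n := PySem.Str.len s
  (PySem.List.pyRange 0 n 1).foldl (fun result i =>
    (PySem.List.pyRange i n 1).foldl (fun r j =>
      if PySem.List.pyGetD s.toList i ' ' = PySem.List.pyGetD s.toList j ' ' then r + 1 else r)
      result) 0

-- ===== PORT B =====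
def substringFirstLast_alt (s : String) : Int :=
  (s.toList.foldl (fun (st : PySem.Dict Char Int × Int) c =>
      let k := st.1.getD c 0 + 1
      (st.1.insert c k, st.2 + k))
    (PySem.Dict.empty, 0)).2

-- ===== PRECONDITION & SPEC =====
def Spec_substringFirstLast (s : String) (out : Int) : Prop := out = substringFirstLast_alt s
instance (s : String) (out : Int) : Decidable (Spec_substringFirstLast s out) := by unfold Spec_substringFirstLast; infer_instance

-- ===== CLAIM (what is proved, stated in full; the proofs are below) =====
def Claim_equal_substringFirstLast : Prop := ∀ (s : String), Dom_substringFirstLast s → Spec_substringFirstLast s (substringFirstLast s)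

-- ===== LEMMAS AND PROOFS =====

/-- Number of pairs i ≤ j with equal characters, by structural recursion from the front. -/
def pvPairs : List Char → Int
  | [] => 0
  | c :: t => (1 + (t.count c : Int)) + pvPairs t

/-- Same quantity computed left-to-right against an already-seen prefix `p` (B's traversal order). -/
def pvPairsFrom (p : List Char) : List Char → Int
  | [] => 0
  | c :: t => ((p.count c : Int) + 1) + pvPairsFrom (p ++ [c]) t

theorem pvCount_cons (a b : Char) (l : List Char) :
    List.count a (b :: l) = List.count a l + if b = a then 1 else 0 := by
  by_cases h : b = a
  · subst h
    simp
  · have h' : ¬ a = b := fun hh => h hh.symm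
    simp [List.count_cons, h, h']

-- A's inner loop over j ∈ [i, n) counts occurrences of c in drop i.
theorem pvInner (l : List Char) (c : Char) (i r0 : Int) (hi : 0 ≤ i) :
    (PySem.List.pyRange i (l.length : Int) 1).foldl
      (fun r j => if c = PySem.List.pyGetD l j ' ' then r + 1 else r) r0
      = r0 + (((l.drop i.toNat).count c : Int)) := by
  rw [PySem.List.foldl_pyRange_pyGetD' l ' ' (fun r x => if c = x then r + 1 else r) r0 hi]
  induction l.drop i.toNat generalizing r0 with
  | nil => simp
  | cons x t ih =>
    simp only [List.foldl_cons]
    by_cases h : c = x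
    · rw [if_pos h, ih, pvCount_cons, if_pos h.symm]; push_cast; ring
    · rw [if_neg h, ih, pvCount_cons, if_neg (fun hh => h hh.symm), Nat.add_zero]

-- A's outer loop, re-indexed over List.range, computes pvPairs.
theorem pvOuter (l : List Char) (init : Int) :
    (List.range l.length).foldl
      (fun acc k => acc + (((l.drop k).count (l.getD k ' ') : Int))) init
      = init + pvPairs l := by
  induction l generalizing init with
  | nil => simp [pvPairs]
  | cons c t ih =>
    rw [List.length_cons, List.range_succ_eq_map, List.foldl_cons, List.foldl_map]
    simp only [List.drop_succ_cons, List.getD_cons_succ, List.drop_zero, List.getD_cons_zero]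
    rw [ih, pvPairs, pvCount_cons, if_pos rfl]; push_cast; ring

theorem pvCount_append_singleton (p : List Char) (c x : Char) :
    (((p ++ [c]).count x : Nat) : Int) = (p.count x : Int) + (if x = c then 1 else 0) := by
  by_cases h : x = c
  · simp [List.count_append, h]
  · have h' : ¬ c = x := fun hh => h hh.symm
    simp [List.count_append, h, h']

-- B's loop with dict state `d` holding exactly the counts of the already-seen prefix `p`.
theorem pvBloop (l : List Char) (p : List Char) (d : PySem.Dict Char Int) (acc : Int)
    (hd : ∀ c, d.getD c 0 = (p.count c : Int)) :
    (l.foldl (fun (st : PySem.Dict Char Int × Int) c =>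
        let k := st.1.getD c 0 + 1
        (st.1.insert c k, st.2 + k)) (d, acc)).2
      = acc + pvPairsFrom p l := by
  induction l generalizing p d acc with
  | nil => simp [pvPairsFrom]
  | cons c t ih =>
    have hstep : (c :: t).foldl (fun (st : PySem.Dict Char Int × Int) c =>
        let k := st.1.getD c 0 + 1
        (st.1.insert c k, st.2 + k)) (d, acc)
        = t.foldl (fun (st : PySem.Dict Char Int × Int) c =>
        let k := st.1.getD c 0 + 1
        (st.1.insert c k, st.2 + k)) (d.insert c (d.getD c 0 + 1), acc + (d.getD c 0 + 1)) := rfl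
    rw [hstep,
      ih (p ++ [c]) _ _ (fun x => by
        rw [PySem.Dict.getD_insert, pvCount_append_singleton]
        by_cases h : x = c <;> simp [h, hd])]
    rw [pvPairsFrom, hd c]; ring

theorem pvSum_append (u : List Char) (p : List Char) (c : Char) :
    (u.map (fun x => ((p ++ [c]).count x : Int))).sum
      = (u.map (fun x => (p.count x : Int))).sum + (u.count c : Int) := by
  induction u with
  | nil => simp
  | cons y u ihu =>
    rw [List.map_cons, List.map_cons, List.sum_cons, List.sum_cons, ihu,
      pvCount_append_singleton, pvCount_cons]
    push_cast
    split_ifs <;> ring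

-- The two traversal orders agree: pvPairsFrom p l = pvPairs l + Σ_{x∈l} count of x in p.
theorem pvFrom_eq (l : List Char) (p : List Char) :
    pvPairsFrom p l = pvPairs l + (l.map (fun x => (p.count x : Int))).sum := by
  induction l generalizing p with
  | nil => simp [pvPairsFrom, pvPairs]
  | cons c t ih =>
    rw [pvPairsFrom, ih, pvPairs, List.map_cons, List.sum_cons, pvSum_append]; ring

-- ===== VERDICT (by name: the statement is the Claim_ definition above) =====
theorem substringFirstLast_spec : Claim_equal_substringFirstLast := by
  intro s _
  unfold Spec_substringFirstLast substringFirstLast substringFirstLast_alt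
  rw [pvBloop s.toList [] PySem.Dict.empty 0 (fun c => by simp), pvFrom_eq]
  simp only [List.count_nil, Nat.cast_zero, List.map_const', List.sum_replicate, smul_zero,
    add_zero]
  rw [PySem.Str.len_eq s, PySem.List.pyRange_one]
  simp only [Int.sub_zero, Int.toNat_natCast, List.foldl_map]
  rw [PySem.List.foldl_congr_mem _ _
    (fun (acc : Int) (k : Nat) => acc + (((s.toList.drop k).count (s.toList.getD k ' ') : Int))) 0
    (fun acc k _ => by
      rw [pvInner s.toList _ (0 + (k : Int)) acc (by omega)]
      simp [PySem.List.pyGetD_natCast])]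
  rw [pvOuter]
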